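-- pv_equiv track=rewrite | github.com/aws-solutions-library-samples/guidance-for-accelerating-sap-clean-core-journey-using-kiro-agents | agents/atc-checker/generate-summary.py | generate_remediation_roadmap
-- ===== SOURCE A (Python) =====
-- def generate_remediation_roadmap(objects):
--     """Generate remediation roadmap section."""
--     level_d = [obj for obj in objects if obj.get("level") == "D"]
--     level_c = [obj for obj in objects if obj.get("level") == "C"]
--     level_b = [obj for obj in objects if obj.get("level") == "B"]
--
--     sections = []
--
--     # Immediate (D → C)
--     sections.append("### Immediate (D → C): Eliminate errors")
--     if level_d:
--         sections.append(f"**{len(level_d)} objects** require immediate attention to remove ERROR findings.")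
--         sections.append("1. Review each Level D object's ATC report")
--         sections.append("2. Replace non-released APIs with released alternatives")
--         sections.append("3. Remove direct SAP modifications")
--     else:
--         sections.append("No Level D objects - this phase is complete.")
--
--     sections.append("")
--
--     # Short-term (C → B)
--     sections.append("### Short-term (C → B): Address warnings")
--     if level_c:
--         sections.append(f"**{len(level_c)} objects** need warning resolution.")
--         sections.append("1. API deprecations → Replace with released APIs")
--         sections.append("2. Performance issues → Optimize code patterns")
--         sections.append("3. Security concerns → Apply security best practices")
--     else:
--         sections.append("No Level C objects - this phase is complete.")
--
--     sections.append("")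
--
--     # Long-term (B → A)
--     sections.append("### Long-term (B → A): Full compliance")
--     if level_b:
--         sections.append(f"**{len(level_b)} objects** have informational findings.")
--         sections.append("1. Documentation gaps → Add required annotations")
--         sections.append("2. Best practice deviations → Align with SAP guidelines")
--     else:
--         sections.append("No Level B objects - all compliant objects are already Level A.")
--
--     return "\n".join(sections)
-- ===== SOURCE B (Python) =====
-- def generate_remediation_roadmap(objects):
--     """Tally the three levels in one if/elif pass, then render a declarative
--     section table with a generic loop (blank-line separators inserted by the
--     renderer), instead of three filtered lists and three hand-written blocks."""
--     d = c = b = 0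
--     for obj in objects:
--         lvl = obj.get("level")
--         if lvl == "D":
--             d += 1
--         elif lvl == "C":
--             c += 1
--         elif lvl == "B":
--             b += 1
--     sections = [
--         ("### Immediate (D → C): Eliminate errors", d,
--          f"**{d} objects** require immediate attention to remove ERROR findings.",
--          ["1. Review each Level D object's ATC report",
--           "2. Replace non-released APIs with released alternatives",
--           "3. Remove direct SAP modifications"],
--          "No Level D objects - this phase is complete."),
--         ("### Short-term (C → B): Address warnings", c,
--          f"**{c} objects** need warning resolution.",
--          ["1. API deprecations → Replace with released APIs",
--           "2. Performance issues → Optimize code patterns",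
--           "3. Security concerns → Apply security best practices"],
--          "No Level C objects - this phase is complete."),
--         ("### Long-term (B → A): Full compliance", b,
--          f"**{b} objects** have informational findings.",
--          ["1. Documentation gaps → Add required annotations",
--           "2. Best practice deviations → Align with SAP guidelines"],
--          "No Level B objects - all compliant objects are already Level A."),
--     ]
--     lines = []
--     for header, n, headline, steps, empty_msg in sections:
--         if lines:
--             lines.append("")
--         lines.append(header)
--         if n:
--             lines.append(headline)
--             lines.extend(steps)
--         else:
--             lines.append(empty_msg)
--     return "\n".join(lines)
-- ===== Notes on version B (the rewrite author's own statement) =====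
-- stated objective: alternative
-- what changed: Replaces A's three list-filtering scans and three hand-written append blocks with one if/elif tallying pass over the objects plus a declarative section table rendered by a single generic loop that inserts the blank-line separators itself.
import Mathlib
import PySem

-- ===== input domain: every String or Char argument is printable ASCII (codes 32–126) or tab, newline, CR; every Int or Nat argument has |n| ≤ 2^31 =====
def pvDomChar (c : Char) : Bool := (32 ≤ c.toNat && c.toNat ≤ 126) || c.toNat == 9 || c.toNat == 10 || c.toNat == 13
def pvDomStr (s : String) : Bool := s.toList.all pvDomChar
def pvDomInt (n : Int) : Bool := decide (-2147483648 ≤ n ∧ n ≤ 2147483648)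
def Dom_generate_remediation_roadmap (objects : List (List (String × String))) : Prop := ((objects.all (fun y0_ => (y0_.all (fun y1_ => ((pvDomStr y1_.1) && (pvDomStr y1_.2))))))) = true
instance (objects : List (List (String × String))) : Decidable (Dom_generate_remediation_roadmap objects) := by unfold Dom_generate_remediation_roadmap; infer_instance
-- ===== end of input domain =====

-- B tallies the three levels in one if/elif pass and renders a declarative section table with one generic loop; objective: alternative decomposition.

-- ===== PORT A =====
-- obj.get("level") on the association-list dict (shared Python primitive)
def pyGetLevel (obj : List (String × String)) : Option String :=
  (PySem.Dict.mk obj).get? "level"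

def generate_remediation_roadmap (objects : List (List (String × String))) : String :=
  let level_d := objects.filter (fun obj => pyGetLevel obj == some "D")
  let level_c := objects.filter (fun obj => pyGetLevel obj == some "C")
  let level_b := objects.filter (fun obj => pyGetLevel obj == some "B")
  let sections : List String := ["### Immediate (D → C): Eliminate errors"]
  let sections := sections ++
    (if level_d.isEmpty then
      ["No Level D objects - this phase is complete."]
     else
      ["**" ++ PySem.Int.toStr (level_d.length : Int) ++ " objects** require immediate attention to remove ERROR findings.",
       "1. Review each Level D object's ATC report",
       "2. Replace non-released APIs with released alternatives",
       "3. Remove direct SAP modifications"])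
  let sections := sections ++ [""]
  let sections := sections ++ ["### Short-term (C → B): Address warnings"]
  let sections := sections ++
    (if level_c.isEmpty then
      ["No Level C objects - this phase is complete."]
     else
      ["**" ++ PySem.Int.toStr (level_c.length : Int) ++ " objects** need warning resolution.",
       "1. API deprecations → Replace with released APIs",
       "2. Performance issues → Optimize code patterns",
       "3. Security concerns → Apply security best practices"])
  let sections := sections ++ [""]
  let sections := sections ++ ["### Long-term (B → A): Full compliance"]
  let sections := sections ++
    (if level_b.isEmpty then
      ["No Level B objects - all compliant objects are already Level A."]
     else
      ["**" ++ PySem.Int.toStr (level_b.length : Int) ++ " objects** have informational findings.",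
       "1. Documentation gaps → Add required annotations",
       "2. Best practice deviations → Align with SAP guidelines"])
  PySem.Str.join "\n" sections

-- ===== PORT B =====
-- one loop step of B's tally (the if/elif chain on obj.get("level"))
def tallyStep (t : Int × Int × Int) (obj : List (String × String)) : Int × Int × Int :=
  let lvl := pyGetLevel obj
  if lvl == some "D" then (t.1 + 1, t.2.1, t.2.2)
  else if lvl == some "C" then (t.1, t.2.1 + 1, t.2.2)
  else if lvl == some "B" then (t.1, t.2.1, t.2.2 + 1)
  else t

-- one iteration of B's rendering loop over a (header, n, headline, steps, empty_msg) entry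
def renderSection (lines : List String)
    (sec : String × Int × String × List String × String) : List String :=
  let (header, n, headline, steps, empty_msg) := sec
  let lines := if lines.isEmpty then lines else lines ++ [""]
  let lines := lines ++ [header]
  if n ≠ 0 then lines ++ [headline] ++ steps else lines ++ [empty_msg]

def generate_remediation_roadmap_alt (objects : List (List (String × String))) : String :=
  let t := objects.foldl tallyStep (0, 0, 0)
  let d := t.1
  let c := t.2.1
  let b := t.2.2
  -- the f-string headlines "**{n} objects** …" are rendered exactly as prefix ++ str(n) ++ suffix
  let sections : List (String × Int × String × List String × String) :=
    [("### Immediate (D → C): Eliminate errors", d,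
      "**" ++ PySem.Int.toStr d ++ " objects** require immediate attention to remove ERROR findings.",
      ["1. Review each Level D object's ATC report",
       "2. Replace non-released APIs with released alternatives",
       "3. Remove direct SAP modifications"],
      "No Level D objects - this phase is complete."),
     ("### Short-term (C → B): Address warnings", c,
      "**" ++ PySem.Int.toStr c ++ " objects** need warning resolution.",
      ["1. API deprecations → Replace with released APIs",
       "2. Performance issues → Optimize code patterns",
       "3. Security concerns → Apply security best practices"],
      "No Level C objects - this phase is complete."),
     ("### Long-term (B → A): Full compliance", b,
      "**" ++ PySem.Int.toStr b ++ " objects** have informational findings.",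
      ["1. Documentation gaps → Add required annotations",
       "2. Best practice deviations → Align with SAP guidelines"],
      "No Level B objects - all compliant objects are already Level A.")]
  PySem.Str.join "\n" (sections.foldl renderSection [])

-- ===== PRECONDITION & SPEC =====
def Spec_generate_remediation_roadmap (objects : List (List (String × String))) (out : String) : Prop := out = generate_remediation_roadmap_alt objects
instance (objects : List (List (String × String))) (out : String) : Decidable (Spec_generate_remediation_roadmap objects out) := by unfold Spec_generate_remediation_roadmap; infer_instance

-- ===== CLAIM (what is proved, stated in full; the proofs are below) =====
def Claim_equal_generate_remediation_roadmap : Prop := ∀ (objects : List (List (String × String))), Dom_generate_remediation_roadmap objects → Spec_generate_remediation_roadmap objects (generate_remediation_roadmap objects)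

-- ===== LEMMAS AND PROOFS =====

-- B's tally fold computes the three per-level counts (= lengths of A's filtered lists).
lemma tally_fold_eq (objects : List (List (String × String))) (t : Int × Int × Int) :
    objects.foldl tallyStep t =
      (t.1 + ((objects.filter (fun obj => pyGetLevel obj == some "D")).length : Int),
       t.2.1 + ((objects.filter (fun obj => pyGetLevel obj == some "C")).length : Int),
       t.2.2 + ((objects.filter (fun obj => pyGetLevel obj == some "B")).length : Int)) := by
  induction objects generalizing t with
  | nil => simp
  | cons o os ih =>
    simp only [List.foldl_cons, ih, List.filter_cons]
    unfold tallyStep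
    by_cases hD : pyGetLevel o == some "D" <;>
    by_cases hC : pyGetLevel o == some "C" <;>
    by_cases hB : pyGetLevel o == some "B" <;>
      simp_all <;> omega

-- ===== VERDICT (by name: the statement is the Claim_ definition above) =====
theorem generate_remediation_roadmap_spec : Claim_equal_generate_remediation_roadmap := by
  intro objects _
  unfold Spec_generate_remediation_roadmap
  unfold generate_remediation_roadmap generate_remediation_roadmap_alt
  simp only [tally_fold_eq, zero_add]
  by_cases hd : (objects.filter (fun obj => pyGetLevel obj == some "D")) = [] <;>
  by_cases hc : (objects.filter (fun obj => pyGetLevel obj == some "C")) = [] <;>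
  by_cases hb : (objects.filter (fun obj => pyGetLevel obj == some "B")) = [] <;>
    simp [hd, hc, hb, renderSection, List.isEmpty_iff, List.length_eq_zero_iff]
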